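-- pv_equiv track=rewrite | github.com/khelwood/advent-of-code | 2024/d22_monkey.py | find_prices
-- ===== SOURCE A (Python) =====
-- PRUNE_MASK = (1<<24)-1
--
-- def next_secret(n):
--     n ^= (n*64)
--     n &= PRUNE_MASK
--     n ^= (n//32)
--     n &= PRUNE_MASK
--     n ^= (n*2048)
--     n &= PRUNE_MASK
--     return n
--
-- def find_prices(n, i):
--     prices = [n%10]
--     changes = [None]
--     for _ in range(i):
--         n = next_secret(n)
--         price = n%10
--         changes.append(price - prices[-1])
--         prices.append(price)
--     return tuple(prices), tuple(changes)
-- ===== SOURCE B (Python) =====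
-- PRUNE_MASK = (1 << 24) - 1
--
--
-- def _basis_images():
--     # Image of each basis vector 1<<b under one PRNG step
--     # (x ^= x<<6; prune; x ^= x>>5; prune; x ^= x<<11; prune).
--     table = []
--     for b in range(24):
--         x = 1 << b
--         x = (x ^ (x << 6)) & PRUNE_MASK
--         x = (x ^ (x >> 5)) & PRUNE_MASK
--         x = (x ^ (x << 11)) & PRUNE_MASK
--         table.append(x)
--     return table
--
--
-- _TABLE = _basis_images()
--
--
-- def find_prices(n, i):
--     # The step is linear over GF(2): the next state is the XOR of the
--     # precomputed images of the set bits of the current 24-bit state.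
--     prices = [n % 10]
--     s = n & PRUNE_MASK
--     for _ in range(i):
--         x = 0
--         for b in range(24):
--             if (s >> b) & 1:
--                 x ^= _TABLE[b]
--         prices.append(x % 10)
--         s = x
--     changes = [None] + [q - p for p, q in zip(prices, prices[1:])]
--     return tuple(prices), tuple(changes)
-- ===== Notes on version B (the rewrite author's own statement) =====
-- stated objective: alternative
-- what changed: B replaces the xorshift arithmetic inside the loop by a GF(2)-linear-algebra formulation: it precomputes the images of the 24 basis bits under one step and advances the masked state by XOR-folding the table over the set bits, building the price list alone in the loop and deriving the change list afterwards by zipping adjacent prices.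
import Mathlib
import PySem

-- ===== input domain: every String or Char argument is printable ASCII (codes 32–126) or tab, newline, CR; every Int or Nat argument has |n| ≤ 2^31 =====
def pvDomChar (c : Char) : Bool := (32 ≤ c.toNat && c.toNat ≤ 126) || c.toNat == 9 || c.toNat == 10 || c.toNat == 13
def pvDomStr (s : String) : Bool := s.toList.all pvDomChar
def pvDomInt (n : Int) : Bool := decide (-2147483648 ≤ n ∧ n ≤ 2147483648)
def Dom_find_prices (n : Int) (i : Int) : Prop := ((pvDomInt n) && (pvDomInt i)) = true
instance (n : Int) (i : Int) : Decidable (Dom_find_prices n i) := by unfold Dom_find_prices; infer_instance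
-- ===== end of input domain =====

-- B reformulates the xorshift step as a GF(2)-linear map: it precomputes the images of the
-- 24 basis bits under one step and advances the masked state by XOR-folding that table over
-- the set bits, building prices in the loop and deriving changes afterwards by zipping
-- adjacent prices; same O(i) cost, proved to return the identical value.


def PRUNE_MASK : Int := (1 <<< 24) - 1

-- ===== PORT A =====
def next_secret (n : Int) : Int :=
  let n := PySem.Int.band (PySem.Int.bxor n (n * 64)) PRUNE_MASK
  let n := PySem.Int.band (PySem.Int.bxor n (PySem.Int.floordiv n 32)) PRUNE_MASK
  let n := PySem.Int.band (PySem.Int.bxor n (n * 2048)) PRUNE_MASK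
  n

-- prices[-1] is read as getLast?.getD 0: prices is always nonempty, so this is exact.
def find_prices (n : Int) (i : Int) : List Int × List (Option Int) :=
  let st := (PySem.List.pyRange 0 i 1).foldl
    (fun (st : Int × List Int × List (Option Int)) _ =>
      let n := next_secret st.1
      let price := PySem.Int.mod n 10
      (n, st.2.1 ++ [price], st.2.2 ++ [some (price - (st.2.1.getLast?.getD 0))]))
    (n, [PySem.Int.mod n 10], [none])
  (st.2.1, st.2.2)

-- ===== PORT B =====
-- _basis_images: b ranges over range(24), so b is nonnegative and 'b.toNat' as the shift
-- amount is exact.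
def pvTable : List Int :=
  (PySem.List.pyRange 0 24 1).foldl
    (fun (table : List Int) b =>
      let x : Int := 1 <<< b.toNat
      let x := PySem.Int.band (PySem.Int.bxor x (x <<< 6)) PRUNE_MASK
      let x := PySem.Int.band (PySem.Int.bxor x (x >>> 5)) PRUNE_MASK
      let x := PySem.Int.band (PySem.Int.bxor x (x <<< 11)) PRUNE_MASK
      table ++ [x]) []

-- _TABLE[b] is read as (pyGet? …).getD 0: b < 24 = len(_TABLE), so this is exact.
def find_prices_alt (n : Int) (i : Int) : List Int × List (Option Int) :=
  let st := (PySem.List.pyRange 0 i 1).foldl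
    (fun (st : List Int × Int) _ =>
      let s := st.2
      let x := (PySem.List.pyRange 0 24 1).foldl
        (fun (x : Int) b =>
          if PySem.Int.band (s >>> b.toNat) 1 ≠ 0 then
            PySem.Int.bxor x ((PySem.List.pyGet? pvTable b).getD 0)
          else x) 0
      (st.1 ++ [PySem.Int.mod x 10], x))
    ([PySem.Int.mod n 10], PySem.Int.band n PRUNE_MASK)
  let prices := st.1
  let changes := (none : Option Int) :: (prices.zip prices.tail).map (fun p => some (p.2 - p.1))
  (prices, changes)

-- ===== PRECONDITION & SPEC =====
def Spec_find_prices (n : Int) (i : Int) (out : List Int × List (Option Int)) : Prop := out = find_prices_alt n i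
instance (n : Int) (i : Int) (out : List Int × List (Option Int)) : Decidable (Spec_find_prices n i out) := by unfold Spec_find_prices; infer_instance

-- ===== CLAIM (what is proved, stated in full; the proofs are below) =====
def Claim_equal_find_prices : Prop := ∀ (n : Int) (i : Int), Dom_find_prices n i → Spec_find_prices n i (find_prices n i)

-- ===== LEMMAS AND PROOFS =====

-- Nat-side model of one xorshift step: two shift-xor-mask stages types
def pvMask : Nat := 2 ^ 24 - 1
def pvSL (c x : Nat) : Nat := (x ^^^ (x <<< c)) &&& pvMask
def pvSR (c x : Nat) : Nat := (x ^^^ (x >>> c)) &&& pvMask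
def pvStep (m : Nat) : Nat := pvSL 11 (pvSR 5 (pvSL 6 m))

theorem tb_mask (i : Nat) : pvMask.testBit i = decide (i < 24) :=
  Nat.testBit_two_pow_sub_one 24 i

theorem tb_sL (c x i : Nat) :
    (pvSL c x).testBit i
      = ((x.testBit i ^^ (decide (i ≥ c) && x.testBit (i - c))) && decide (i < 24)) := by
  simp [pvSL, Nat.testBit_and, Nat.testBit_xor, Nat.testBit_shiftLeft, tb_mask]

theorem tb_sR (c x i : Nat) :
    (pvSR c x).testBit i
      = ((x.testBit i ^^ x.testBit (c + i)) && decide (i < 24)) := by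
  simp [pvSR, Nat.testBit_and, Nat.testBit_xor, Nat.testBit_shiftRight, tb_mask]

theorem sL_xor (c a b : Nat) : pvSL c (a ^^^ b) = pvSL c a ^^^ pvSL c b := by
  apply Nat.eq_of_testBit_eq
  intro i
  simp only [Nat.testBit_xor, tb_sL]
  cases a.testBit i <;> cases b.testBit i <;> cases a.testBit (i - c) <;>
    cases b.testBit (i - c) <;> cases decide (i ≥ c) <;> cases decide (i < 24) <;> rfl

theorem sR_xor (c a b : Nat) : pvSR c (a ^^^ b) = pvSR c a ^^^ pvSR c b := by
  apply Nat.eq_of_testBit_eq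
  intro i
  simp only [Nat.testBit_xor, tb_sR]
  cases a.testBit i <;> cases b.testBit i <;> cases a.testBit (c + i) <;>
    cases b.testBit (c + i) <;> cases decide (i < 24) <;> rfl

theorem step_xor (a b : Nat) : pvStep (a ^^^ b) = pvStep a ^^^ pvStep b := by
  simp [pvStep, sL_xor, sR_xor]

theorem step_zero : pvStep 0 = 0 := by decide

theorem step_le (m : Nat) : pvStep m ≤ pvMask := by
  simp only [pvStep, pvSL]
  exact Nat.and_le_right

theorem sL6_and_mask (x : Nat) : pvSL 6 (x &&& pvMask) = pvSL 6 x := by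
  apply Nat.eq_of_testBit_eq
  intro i
  simp only [tb_sL, Nat.testBit_and, tb_mask]
  by_cases h24 : i < 24
  · by_cases h6 : i ≥ 6
    · have : i - 6 < 24 := by omega
      simp [h24, h6, this]
    · simp [h24, h6]
  · simp [h24]

-- complement: testBit of (2^j - 1 - k)
theorem tb_pow_sub (i : Nat) : ∀ (j k : Nat), k < 2 ^ j → i < j →
    (2 ^ j - 1 - k).testBit i = !k.testBit i := by
  induction i with
  | zero =>
    intro j k hk hij
    have h2 : 2 ^ j = 2 * 2 ^ (j - 1) := by
      rw [← pow_succ']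
      congr 1
      omega
    simp only [Nat.testBit_zero]
    rcases Nat.mod_two_eq_zero_or_one k with h | h <;>
      simp [h] <;> omega
  | succ i ih =>
    intro j k hk hij
    have h2 : 2 ^ j = 2 * 2 ^ (j - 1) := by
      rw [← pow_succ']
      congr 1
      omega
    have hdiv : (2 ^ j - 1 - k) / 2 = 2 ^ (j - 1) - 1 - k / 2 := by omega
    rw [Nat.testBit_add_one, Nat.testBit_add_one, hdiv]
    exact ih (j - 1) (k / 2) (by omega) (by omega)

theorem tb_64m63 (m i : Nat) :
    (64 * m + 63).testBit i = (decide (i < 6) || m.testBit (i - 6)) := by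
  by_cases h : i < 6
  · interval_cases i <;> simp [Nat.testBit_eq_decide_div_mod_eq] <;> omega
  · obtain ⟨j, rfl⟩ : ∃ j, i = 6 + j := ⟨i - 6, by omega⟩
    simp only [Nat.testBit_eq_decide_div_mod_eq]
    have hp : (2 : Nat) ^ (6 + j) = 64 * 2 ^ j := by rw [pow_add]; norm_num
    have : (64 * m + 63) / 2 ^ (6 + j) = m / 2 ^ j := by
      have h64 : (64 * m + 63) / 64 = m := by omega
      rw [hp, ← Nat.div_div_eq_div_mul, h64]
    rw [this]
    simp [show ¬(6 + j < 6) by omega, show 6 + j - 6 = j by omega]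

-- the first xorshift stage only depends on the state modulo 2^24, in Python's
-- two's-complement reading of a negative n
theorem key_neg (m : Nat) :
    (m ^^^ (64 * m + 63)) &&& pvMask
      = pvSL 6 (pvMask - (pvMask &&& m)) := by
  apply Nat.eq_of_testBit_eq
  intro i
  have hk : pvMask &&& m < 2 ^ 24 := by
    have := Nat.and_le_left (n := pvMask) (m := m)
    simp only [pvMask] at *
    omega
  simp only [pvSL, Nat.testBit_and, Nat.testBit_xor, Nat.testBit_shiftLeft, tb_mask, tb_64m63]
  by_cases h24 : i < 24
  · have hc : (2 ^ 24 - 1 - (pvMask &&& m)).testBit i = !(pvMask &&& m).testBit i :=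
      tb_pow_sub i 24 _ hk h24
    have hmask_eq : pvMask - (pvMask &&& m) = 2 ^ 24 - 1 - (pvMask &&& m) := by
      simp [pvMask]
    rw [hmask_eq]
    by_cases h6 : i ≥ 6
    · have h624 : i - 6 < 24 := by omega
      have hc6 : (2 ^ 24 - 1 - (pvMask &&& m)).testBit (i - 6) = !(pvMask &&& m).testBit (i - 6) :=
        tb_pow_sub (i - 6) 24 _ hk h624
      rw [hc, hc6]
      simp only [Nat.testBit_and, tb_mask, h24, h624, decide_true, Bool.true_and]
      simp [show ¬ i < 6 by omega, h6]
    · rw [hc]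
      simp only [Nat.testBit_and, tb_mask, h24, decide_true, Bool.true_and]
      simp [show i < 6 by omega, show ¬ i ≥ 6 from h6]
  · simp [h24]

theorem mask_cast : PRUNE_MASK = ((pvMask : Nat) : Int) := by decide

-- one full step on a cast nonnegative stage-1 value
theorem ns_from_stage1 (n : Int) (u : Nat)
    (h : PySem.Int.band (PySem.Int.bxor n (n * 64)) PRUNE_MASK = ((pvSL 6 u : Nat) : Int)) :
    next_secret n = ((pvStep u : Nat) : Int) := by
  simp only [next_secret]
  rw [h, mask_cast]
  have h32 := PySem.Int.floordiv_natCast (pvSL 6 u) 32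
  rw [show ((32 : Nat) : Int) = (32 : Int) by norm_num] at h32
  rw [h32, show pvSL 6 u / 32 = pvSL 6 u >>> 5 from by rw [Nat.shiftRight_eq_div_pow]]
  simp only [PySem.Int.bxor_natCast, PySem.Int.band_natCast]
  rw [show (2048 : Int) = ((2048 : Nat) : Int) by norm_num, ← Nat.cast_mul]
  simp only [PySem.Int.bxor_natCast, PySem.Int.band_natCast]
  congr 1
  simp [pvStep, pvSL, pvSR, Nat.shiftLeft_eq]

-- Python's n & PRUNE_MASK and one step from an arbitrary int, in one package
theorem band_step_spec (n : Int) :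
    ∃ u : Nat, u ≤ pvMask ∧ PySem.Int.band n PRUNE_MASK = ((u : Nat) : Int) ∧
      next_secret n = ((pvStep u : Nat) : Int) := by
  by_cases hn : 0 ≤ n
  · refine ⟨n.toNat &&& pvMask, Nat.and_le_right, ?_, ?_⟩
    · rw [mask_cast, ← Int.toNat_of_nonneg hn, PySem.Int.band_natCast, Int.toNat_of_nonneg hn]
    · apply ns_from_stage1
      rw [← Int.toNat_of_nonneg hn, mask_cast]
      rw [show ((n.toNat : Nat) : Int) * 64 = ((n.toNat * 64 : Nat) : Int) by push_cast; ring]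
      rw [PySem.Int.bxor_natCast, PySem.Int.band_natCast]
      rw [sL6_and_mask]
      congr 1
      simp [pvSL, Nat.shiftLeft_eq, max_eq_left hn]
  · set m : Nat := (-n - 1).toNat with hm
    refine ⟨pvMask - (pvMask &&& m), by omega, ?_, ?_⟩
    · simp only [PySem.Int.band, if_neg hn, if_pos (show (0:Int) ≤ PRUNE_MASK by decide)]
      congr 1
    · apply ns_from_stage1
      have h64 : ¬ (0 : Int) ≤ n * 64 := by
        have : n * 64 < 0 := by
          have h0 : n < 0 := by omega
          have := mul_neg_of_neg_of_pos h0 (show (0:Int) < 64 by norm_num)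
          simpa using this
        omega
      simp only [PySem.Int.bxor, if_neg hn, if_neg h64]
      have hx : (-(n * 64) - 1).toNat = 64 * m + 63 := by omega
      rw [hx, mask_cast, PySem.Int.band_natCast, key_neg]

theorem tbl_get : ∀ k : Nat, k < 24 →
    (PySem.List.pyGet? pvTable ((k : Nat) : Int)).getD 0 = ((pvStep (2 ^ k) : Nat) : Int) := by
  decide

theorem mod_pow_succ_xor (m k : Nat) :
    m % 2 ^ (k + 1) = (m % 2 ^ k) ^^^ (if m.testBit k then 2 ^ k else 0) := by
  apply Nat.eq_of_testBit_eq
  intro i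
  by_cases h : m.testBit k <;>
    simp only [h, if_true, Nat.testBit_mod_two_pow, Nat.testBit_xor, Nat.testBit_two_pow]
  · by_cases hik : i < k
    · simp [show i < k + 1 by omega, hik, show k ≠ i by omega]
    · by_cases hik2 : i = k
      · subst hik2
        simp [show i < i + 1 by omega, h]
      · simp [show ¬ i < k + 1 by omega, show ¬ i < k by omega, show k ≠ i by omega]
  · by_cases hik : i < k
    · simp [show i < k + 1 by omega, hik]
    · by_cases hik2 : i = k
      · subst hik2
        simp [show i < i + 1 by omega, h]
      · simp [show ¬ i < k + 1 by omega, show ¬ i < k by omega]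

theorem inner_aux (m : Nat) : ∀ k : Nat, k ≤ 24 →
    (List.range k).foldl
      (fun (x : Int) (b : Nat) =>
        if PySem.Int.band ((((m : Nat) : Int)) >>> (((b : Nat) : Int)).toNat) 1 ≠ 0 then
          PySem.Int.bxor x ((PySem.List.pyGet? pvTable ((b : Nat) : Int)).getD 0)
        else x) 0 = ((pvStep (m % 2 ^ k) : Nat) : Int) := by
  intro k
  induction k with
  | zero => intro _; simp [Nat.mod_one, step_zero]
  | succ k ih =>
    intro hk
    rw [List.range_succ, List.foldl_append, ih (by omega)]
    simp only [List.foldl_cons, List.foldl_nil, Int.toNat_natCast]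
    have hcond : PySem.Int.band (((m : Nat) : Int) >>> k) 1 = (((m >>> k) % 2 : Nat) : Int) := by
      rw [show (((m : Nat) : Int) >>> k) = (((m >>> k : Nat)) : Int) from rfl,
        show (1 : Int) = ((1 : Nat) : Int) by norm_num, PySem.Int.band_natCast,
        Nat.and_one_is_mod]
    have htb : (m >>> k) % 2 = 1 ↔ m.testBit k := by
      rw [Nat.testBit_eq_decide_div_mod_eq, Nat.shiftRight_eq_div_pow]
      simp
    simp only [hcond]
    split_ifs with hc
    · have h : m.testBit k := by
        rcases Nat.mod_two_eq_zero_or_one (m >>> k) with h0 | h0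
        · simp [h0] at hc
        · exact htb.mp h0
      rw [tbl_get k (by omega), PySem.Int.bxor_natCast, ← step_xor,
        mod_pow_succ_xor m k, if_pos h]
    · have h : ¬ m.testBit k := by
        intro h
        exact hc (by rw [htb.mpr h]; norm_num)
      rw [mod_pow_succ_xor m k, if_neg h, Nat.xor_zero]

theorem inner_full (m : Nat) (hm : m ≤ pvMask) :
    (PySem.List.pyRange 0 24 1).foldl
      (fun (x : Int) b =>
        if PySem.Int.band (((m : Nat) : Int) >>> b.toNat) 1 ≠ 0 then
          PySem.Int.bxor x ((PySem.List.pyGet? pvTable b).getD 0)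
        else x) 0 = ((pvStep m : Nat) : Int) := by
  rw [show PySem.List.pyRange 0 24 1 = (List.range 24).map (fun k : Nat => (k : Int)) from by
    decide]
  rw [List.foldl_map]
  have h := inner_aux m 24 le_rfl
  rwa [Nat.mod_eq_of_lt (by simp only [pvMask] at hm; omega)] at h

def pvChanges (p : List Int) : List (Option Int) :=
  (none : Option Int) :: (p.zip p.tail).map (fun q => some (q.2 - q.1))

theorem pvChanges_append (p : List Int) (q : Int) (hp : p ≠ []) :
    pvChanges (p ++ [q]) = pvChanges p ++ [some (q - p.getLast?.getD 0)] := by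
  induction p with
  | nil => cases hp rfl
  | cons a t ih =>
    cases t with
    | nil => simp [pvChanges]
    | cons b t' =>
      have h := ih (by simp)
      simp only [pvChanges, List.cons_append, List.zip_cons_cons, List.tail_cons,
        List.map_cons, List.cons.injEq, true_and] at h ⊢
      simpa [pvChanges] using h

theorem band_id_of_le (v : Nat) (hv : v ≤ pvMask) :
    PySem.Int.band ((v : Nat) : Int) PRUNE_MASK = ((v : Nat) : Int) := by
  rw [mask_cast, PySem.Int.band_natCast]
  congr 1
  rw [show pvMask = 2 ^ 24 - 1 from rfl, Nat.and_two_pow_sub_one_eq_mod]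
  exact Nat.mod_eq_of_lt (by simp only [pvMask] at hv; omega)

theorem loops_eq (l : List Int) : ∀ (nA : Int) (P : List Int) (u : Nat), P ≠ [] →
    u ≤ pvMask → PySem.Int.band nA PRUNE_MASK = ((u : Nat) : Int) →
    (l.foldl
      (fun (st : List Int × Int) _ =>
        let s := st.2
        let x := (PySem.List.pyRange 0 24 1).foldl
          (fun (x : Int) b =>
            if PySem.Int.band (s >>> b.toNat) 1 ≠ 0 then
              PySem.Int.bxor x ((PySem.List.pyGet? pvTable b).getD 0)
            else x) 0
        (st.1 ++ [PySem.Int.mod x 10], x))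
      (P, ((u : Nat) : Int)))
      = ((l.foldl
          (fun (st : Int × List Int × List (Option Int)) _ =>
            let n := next_secret st.1
            let price := PySem.Int.mod n 10
            (n, st.2.1 ++ [price], st.2.2 ++ [some (price - (st.2.1.getLast?.getD 0))]))
          (nA, P, pvChanges P)).2.1,
         PySem.Int.band (l.foldl
          (fun (st : Int × List Int × List (Option Int)) _ =>
            let n := next_secret st.1
            let price := PySem.Int.mod n 10
            (n, st.2.1 ++ [price], st.2.2 ++ [some (price - (st.2.1.getLast?.getD 0))]))
          (nA, P, pvChanges P)).1 PRUNE_MASK)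
      ∧ (l.foldl
          (fun (st : Int × List Int × List (Option Int)) _ =>
            let n := next_secret st.1
            let price := PySem.Int.mod n 10
            (n, st.2.1 ++ [price], st.2.2 ++ [some (price - (st.2.1.getLast?.getD 0))]))
          (nA, P, pvChanges P)).2.2
        = pvChanges (l.foldl
          (fun (st : Int × List Int × List (Option Int)) _ =>
            let n := next_secret st.1
            let price := PySem.Int.mod n 10
            (n, st.2.1 ++ [price], st.2.2 ++ [some (price - (st.2.1.getLast?.getD 0))]))
          (nA, P, pvChanges P)).2.1 := by
  induction l with
  | nil =>
    intro nA P u hP hu hband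
    refine ⟨?_, rfl⟩
    simp only [List.foldl_nil]
    rw [hband]
  | cons x xs ih =>
    intro nA P u hP hu hband
    obtain ⟨u', hu', hband', hstep⟩ := band_step_spec nA
    have huu : u = u' := by
      have := hband.symm.trans hband'
      exact_mod_cast this
    subst huu
    simp only [List.foldl_cons]
    have hx := inner_full u hu
    rw [hx, hstep, ← pvChanges_append P _ hP]
    exact ih (((pvStep u : Nat) : Int)) (P ++ [PySem.Int.mod ((pvStep u : Nat) : Int) 10])
      (pvStep u) (by simp) (step_le u) (band_id_of_le _ (step_le u))

-- ===== VERDICT (by name: the statement is the Claim_ definition above) =====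
theorem find_prices_spec : Claim_equal_find_prices := by
  intro n i _
  unfold Spec_find_prices find_prices find_prices_alt
  simp only []
  obtain ⟨u, hu, hband, _⟩ := band_step_spec n
  rw [hband]
  rw [show ([none] : List (Option Int)) = pvChanges [PySem.Int.mod n 10] from by simp [pvChanges]]
  obtain ⟨h1, h2⟩ := loops_eq (PySem.List.pyRange 0 i 1) n [PySem.Int.mod n 10] u (by simp) hu hband
  rw [h1, h2]
  rfl
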